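-- pv_equiv track=rewrite | github.com/GoldenRodger5/nutrivize | backend/comprehensive_vectorization.py | _extract_chat_topics
-- ===== SOURCE A (Python) =====
-- from typing import Dict, List, Any, Optional
--
-- def _extract_chat_topics(session: Dict) -> List[str]:
--     """Extract topics from chat session"""
--     topics = []
--     messages = session.get("messages", [])
--
--     # Simple keyword-based topic extraction
--     food_keywords = ["food", "meal", "recipe", "nutrition", "calories", "protein"]
--     exercise_keywords = ["exercise", "workout", "activity", "fitness"]
--     goal_keywords = ["goal", "target", "lose", "gain", "weight"]
--
--     content = " ".join(msg.get("content", "").lower() for msg in messages)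
--
--     if any(keyword in content for keyword in food_keywords):
--         topics.append("food_nutrition")
--     if any(keyword in content for keyword in exercise_keywords):
--         topics.append("exercise_fitness")
--     if any(keyword in content for keyword in goal_keywords):
--         topics.append("goals_planning")
--
--     return topics if topics else ["general"]
-- ===== SOURCE B (Python) =====
-- from typing import Dict, List, Any, Optional
--
-- _CATEGORIES = [
--     ("food_nutrition", ("food", "meal", "recipe", "nutrition", "calories", "protein")),
--     ("exercise_fitness", ("exercise", "workout", "activity", "fitness")),
--     ("goals_planning", ("goal", "target", "lose", "gain", "weight")),
-- ]
--
-- def _extract_chat_topics(session: Dict) -> List[str]: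
--     """Extract topics from chat session (per-message scan, no joined string)."""
--     found = [False, False, False]
--     for msg in session.get("messages", []):
--         text = msg.get("content", "").lower()
--         for i, (_, keywords) in enumerate(_CATEGORIES):
--             if not found[i]:
--                 found[i] = any(kw in text for kw in keywords)
--     topics = [name for (name, _), hit in zip(_CATEGORIES, found) if hit]
--     return topics if topics else ["general"]
-- ===== Notes on version B (the rewrite author's own statement) =====
-- stated objective: alternative
-- what changed: Replaces A's build-one-joined-lowercased-string-then-substring-search strategy by a single pass over the messages that keeps a list of per-category found flags, testing each message's lowercased content directly (valid because no keyword contains the space separator).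
import Mathlib
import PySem

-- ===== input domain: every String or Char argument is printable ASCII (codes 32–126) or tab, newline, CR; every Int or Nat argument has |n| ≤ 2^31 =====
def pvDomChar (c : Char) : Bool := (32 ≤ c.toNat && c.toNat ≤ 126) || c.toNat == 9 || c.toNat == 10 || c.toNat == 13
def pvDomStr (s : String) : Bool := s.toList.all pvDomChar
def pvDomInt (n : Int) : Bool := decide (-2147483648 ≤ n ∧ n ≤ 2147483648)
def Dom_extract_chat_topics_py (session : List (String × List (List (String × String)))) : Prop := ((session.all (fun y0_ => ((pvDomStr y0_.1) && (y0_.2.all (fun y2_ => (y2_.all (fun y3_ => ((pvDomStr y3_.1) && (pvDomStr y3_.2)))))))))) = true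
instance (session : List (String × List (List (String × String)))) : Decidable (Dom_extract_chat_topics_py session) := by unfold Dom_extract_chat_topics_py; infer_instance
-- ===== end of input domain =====

-- B replaces A's join-all-messages-then-search strategy by a single per-message scan
-- keeping three found-flags (objective: alternative decomposition, same cost).

-- ===== PORT A =====
-- literal port of A: join the lowercased message contents, then search the joined string
def extract_chat_topics_py (session : List (String × List (List (String × String)))) : List String :=
  let messages := (PySem.Dict.mk session).getD "messages" []
  let food_keywords : List String := ["food", "meal", "recipe", "nutrition", "calories", "protein"]
  let exercise_keywords : List String := ["exercise", "workout", "activity", "fitness"]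
  let goal_keywords : List String := ["goal", "target", "lose", "gain", "weight"]
  let content := PySem.Str.join " " (messages.map (fun msg => PySem.Str.lower ((PySem.Dict.mk msg).getD "content" "")))
  let topics : List String := []
  let topics := if food_keywords.any (fun kw => PySem.Str.isIn kw content) then topics ++ ["food_nutrition"] else topics
  let topics := if exercise_keywords.any (fun kw => PySem.Str.isIn kw content) then topics ++ ["exercise_fitness"] else topics
  let topics := if goal_keywords.any (fun kw => PySem.Str.isIn kw content) then topics ++ ["goals_planning"] else topics
  if topics = [] then ["general"] else topics

-- ===== PORT B =====
def pvCategories : List (String × List String) :=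
  [("food_nutrition", ["food", "meal", "recipe", "nutrition", "calories", "protein"]),
   ("exercise_fitness", ["exercise", "workout", "activity", "fitness"]),
   ("goals_planning", ["goal", "target", "lose", "gain", "weight"])]

-- one pass over the messages, updating a list of found-flags (Source B's loop)
def pvScan (messages : List (List (String × String))) : List Bool :=
  messages.foldl
    (fun found msg =>
      let text := PySem.Str.lower ((PySem.Dict.mk msg).getD "content" "")
      (found.zip pvCategories).map
        (fun p => if p.1 then true else p.2.2.any (fun kw => PySem.Str.isIn kw text)))
    [false, false, false]

def extract_chat_topics_py_alt (session : List (String × List (List (String × String)))) : List String :=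
  let messages := (PySem.Dict.mk session).getD "messages" []
  let found := pvScan messages
  let topics := ((pvCategories.zip found).filter (fun p => p.2)).map (fun p => p.1.1)
  if topics = [] then ["general"] else topics

-- ===== PRECONDITION & SPEC =====
def Spec_extract_chat_topics_py (session : List (String × List (List (String × String)))) (out : List String) : Prop := out = extract_chat_topics_py_alt session
instance (session : List (String × List (List (String × String)))) (out : List String) : Decidable (Spec_extract_chat_topics_py session out) := by unfold Spec_extract_chat_topics_py; infer_instance

-- ===== CLAIM (what is proved, stated in full; the proofs are below) =====
def Claim_equal_extract_chat_topics_py : Prop := ∀ (session : List (String × List (List (String × String)))), Dom_extract_chat_topics_py session → Spec_extract_chat_topics_py session (extract_chat_topics_py session)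

-- ===== LEMMAS AND PROOFS =====

-- a space-free keyword occurring in xs ++ ' ' :: ys occurs in xs or in ys
theorem pv_infix_append_space (k ys : List Char) (hk : k ≠ []) (hsp : ' ' ∉ k) :
    ∀ xs : List Char, k <:+: xs ++ ' ' :: ys → k <:+: xs ∨ k <:+: ys := by
  intro xs
  induction xs with
  | nil =>
    intro h
    rcases h with ⟨s, t, hst⟩
    cases s with
    | nil =>
      exfalso
      cases k with
      | nil => exact hk rfl
      | cons c k' =>
        simp at hst
        exact hsp (by simp [hst.1])
    | cons c s' =>
      right
      simp at hst
      exact ⟨s', t, by simpa [List.append_assoc] using hst.2⟩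
  | cons x xs' ih =>
    intro h
    rcases List.infix_cons_iff.mp (by simpa using h) with hpre | hinf
    · by_cases hlen : k.length ≤ (x :: xs').length
      · left
        have hpre2 : (x :: xs') <+: (x :: (xs' ++ ' ' :: ys)) := by
          simp
        exact (List.prefix_of_prefix_length_le hpre hpre2 hlen).isInfix
      · exfalso
        rw [not_le] at hlen
        have hidx : (x :: xs').length < ((x :: xs') ++ ' ' :: ys).length := by
          simp
        have : ((x :: xs') ++ ' ' :: ys)[(x :: xs').length] = ' ' := by
          rw [List.getElem_append_right (by omega)]
          simp
        have hk' : k[(x :: xs').length]'(by omega) = ' ' := by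
          rw [hpre.getElem]
          exact this
        exact hsp (hk' ▸ List.getElem_mem _)
    · rcases ih hinf with h1 | h2
      · exact Or.inl (h1.trans ⟨[x], [], by simp⟩)
      · exact Or.inr h2

-- occurrence in the space-joined list ↔ occurrence in some part (keyword nonempty, space-free)
theorem pv_infix_join (k : List Char) (hk : k ≠ []) (hsp : ' ' ∉ k) :
    ∀ parts : List (List Char),
      (k <:+: PySem.Chars.join [' '] parts ↔ ∃ p ∈ parts, k <:+: p) := by
  intro parts
  induction parts with
  | nil =>
    simp [PySem.Chars.join_nil]
    intro h
    exact hk h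
  | cons a t ih =>
    cases t with
    | nil => simp [PySem.Chars.join_singleton]
    | cons b t' =>
      rw [PySem.Chars.join_cons_cons]
      constructor
      · intro h
        have h' : k <:+: a ++ ' ' :: PySem.Chars.join [' '] (b :: t') := by simp at h; exact h
        rcases pv_infix_append_space k _ hk hsp a h' with h1 | h2
        · exact ⟨a, by simp, h1⟩
        · rcases ih.mp h2 with ⟨p, hp, hkp⟩
          exact ⟨p, by simp [hp], hkp⟩
      · rintro ⟨p, hp, hkp⟩
        rcases List.mem_cons.mp hp with rfl | hp'
        · exact hkp.trans ⟨[], ' ' :: PySem.Chars.join [' '] (b :: t'), by simp⟩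
        · have : k <:+: PySem.Chars.join [' '] (b :: t') := ih.mpr ⟨p, hp', hkp⟩
          exact this.trans ⟨a ++ [' '], [], by simp⟩

-- a keyword is in " ".join texts iff it is in some text (for nonempty space-free keywords)
theorem pv_isIn_join (kw : String) (hk : kw.toList ≠ []) (hsp : ' ' ∉ kw.toList)
    (texts : List String) :
    PySem.Str.isIn kw (PySem.Str.join " " texts) = texts.any (fun t => PySem.Str.isIn kw t) := by
  rw [Bool.eq_iff_iff, PySem.Str.isIn_iff_infix, List.any_eq_true]
  have hj : (PySem.Str.join " " texts).toList = PySem.Chars.join [' '] (texts.map String.toList) := by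
    simp [PySem.Str.toList_join]
  rw [hj, pv_infix_join kw.toList hk hsp (texts.map String.toList)]
  constructor
  · rintro ⟨p, hp, hkp⟩
    rcases List.mem_map.mp hp with ⟨t, ht, rfl⟩
    exact ⟨t, ht, (PySem.Str.isIn_iff_infix _ _).mpr hkp⟩
  · rintro ⟨t, ht, h⟩
    exact ⟨t.toList, List.mem_map_of_mem ht, (PySem.Str.isIn_iff_infix _ _).mp h⟩

theorem pv_kws_ok : ∀ cat ∈ pvCategories, ∀ kw ∈ cat.2, kw.toList ≠ [] ∧ ' ' ∉ kw.toList := by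
  decide

-- for a whole keyword list: any-in-joined = any message gives a hit (swap of the two 'any's)
theorem pv_any_join (kws : List String) (hok : ∀ kw ∈ kws, kw.toList ≠ [] ∧ ' ' ∉ kw.toList)
    (texts : List String) :
    kws.any (fun kw => PySem.Str.isIn kw (PySem.Str.join " " texts))
      = texts.any (fun t => kws.any (fun kw => PySem.Str.isIn kw t)) := by
  rw [Bool.eq_iff_iff]
  simp only [List.any_eq_true]
  constructor
  · rintro ⟨kw, hkw, h⟩
    rw [pv_isIn_join kw (hok kw hkw).1 (hok kw hkw).2 texts] at h
    rcases List.any_eq_true.mp h with ⟨t, ht, h'⟩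
    exact ⟨t, ht, kw, hkw, h'⟩
  · rintro ⟨t, ht, kw, hkw, h⟩
    refine ⟨kw, hkw, ?_⟩
    rw [pv_isIn_join kw (hok kw hkw).1 (hok kw hkw).2 texts]
    exact List.any_eq_true.mpr ⟨t, ht, h⟩

def pvText (msg : List (String × String)) : String :=
  PySem.Str.lower ((PySem.Dict.mk msg).getD "content" "")

def pvHit (kws : List String) (msg : List (String × String)) : Bool :=
  kws.any (fun kw => PySem.Str.isIn kw (pvText msg))

-- the flag fold of B computes the three 'any over messages' values
theorem pv_scan_eq (messages : List (List (String × String))) :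
    ∀ a b c : Bool,
      messages.foldl
        (fun found msg =>
          let text := PySem.Str.lower ((PySem.Dict.mk msg).getD "content" "")
          (found.zip pvCategories).map
            (fun p => if p.1 then true else p.2.2.any (fun kw => PySem.Str.isIn kw text)))
        [a, b, c]
      = [a || messages.any (pvHit (pvCategories[0]!).2),
         b || messages.any (pvHit (pvCategories[1]!).2),
         c || messages.any (pvHit (pvCategories[2]!).2)] := by
  induction messages with
  | nil => simp
  | cons m t ih =>
    intro a b c
    simp only [List.foldl_cons, List.any_cons]
    rw [show ((([a, b, c].zip pvCategories).map
        (fun p => if p.1 then true else p.2.2.any (fun kw => PySem.Str.isIn kw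
          (PySem.Str.lower ((PySem.Dict.mk m).getD "content" ""))))) =
        [a || pvHit (pvCategories[0]!).2 m, b || pvHit (pvCategories[1]!).2 m,
         c || pvHit (pvCategories[2]!).2 m]) from by
      cases a <;> cases b <;> cases c <;> simp [pvCategories, pvHit, pvText]]
    rw [ih]
    simp [Bool.or_assoc]

theorem pv_scan_eq' (messages : List (List (String × String))) :
    pvScan messages
      = [messages.any (pvHit (pvCategories[0]!).2),
         messages.any (pvHit (pvCategories[1]!).2),
         messages.any (pvHit (pvCategories[2]!).2)] := by
  have := pv_scan_eq messages false false false
  simpa [pvScan] using this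

-- ===== VERDICT (by name: the statement is the Claim_ definition above) =====
theorem extract_chat_topics_py_spec : Claim_equal_extract_chat_topics_py := by
  intro session _
  unfold Spec_extract_chat_topics_py extract_chat_topics_py extract_chat_topics_py_alt
  simp only []
  set messages := (PySem.Dict.mk session).getD "messages" [] with hm
  rw [pv_scan_eq' messages]
  have hfood := pv_any_join (pvCategories[0]!).2
    (pv_kws_ok (pvCategories[0]!) (by decide)) (messages.map pvText)
  have hex := pv_any_join (pvCategories[1]!).2
    (pv_kws_ok (pvCategories[1]!) (by decide)) (messages.map pvText)
  have hgoal := pv_any_join (pvCategories[2]!).2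
    (pv_kws_ok (pvCategories[2]!) (by decide)) (messages.map pvText)
  simp only [List.any_map] at hfood hex hgoal
  have hmap : messages.map (fun msg => PySem.Str.lower ((PySem.Dict.mk msg).getD "content" ""))
      = messages.map pvText := by simp [pvText]
  rw [hmap]
  rw [show (["food", "meal", "recipe", "nutrition", "calories", "protein"] : List String)
        = (pvCategories[0]!).2 from by decide,
      show (["exercise", "workout", "activity", "fitness"] : List String)
        = (pvCategories[1]!).2 from by decide,
      show (["goal", "target", "lose", "gain", "weight"] : List String)
        = (pvCategories[2]!).2 from by decide]
  rw [hfood, hex, hgoal]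
  have e0 : (fun t => ((pvCategories[0]!).2).any fun kw => PySem.Str.isIn kw t) ∘ pvText
      = pvHit (pvCategories[0]!).2 := by funext m; simp [pvHit]
  have e1 : (fun t => ((pvCategories[1]!).2).any fun kw => PySem.Str.isIn kw t) ∘ pvText
      = pvHit (pvCategories[1]!).2 := by funext m; simp [pvHit]
  have e2 : (fun t => ((pvCategories[2]!).2).any fun kw => PySem.Str.isIn kw t) ∘ pvText
      = pvHit (pvCategories[2]!).2 := by funext m; simp [pvHit]
  rw [e0, e1, e2]
  cases hf : messages.any (pvHit (pvCategories[0]!).2) <;>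
    cases he : messages.any (pvHit (pvCategories[1]!).2) <;>
      cases hg : messages.any (pvHit (pvCategories[2]!).2) <;>
        simp [pvCategories]
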